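-- pv_equiv track=rewrite | github.com/amazinglySK/AOC | AOC_2020/problem-17/main.py | create_quadruples
-- ===== SOURCE A (Python) =====
-- def create_quadruples(x, y, z, w) :
--     t = []
--     for i in x :
--         for j in y:
--             for k in z :
--                 for l in w:
--                     t.append((i, j, k, l))
--     return t
-- ===== SOURCE B (Python) =====
-- def create_quadruples(x, y, z, w):
--     # Different decomposition: precompute the two pairwise products and
--     # combine them in a single pass (same lexicographic order as A).
--     xy = [(i, j) for i in x for j in y]
--     zw = [(k, l) for k in z for l in w]
--     return [(i, j, k, l) for (i, j) in xy for (k, l) in zw]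
-- ===== Notes on version B (the rewrite author's own statement) =====
-- stated objective: alternative
-- what changed: Replaces four nested appending loops with two precomputed pairwise products (x×y and z×w) combined by a single flatMap pass.
import Mathlib
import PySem

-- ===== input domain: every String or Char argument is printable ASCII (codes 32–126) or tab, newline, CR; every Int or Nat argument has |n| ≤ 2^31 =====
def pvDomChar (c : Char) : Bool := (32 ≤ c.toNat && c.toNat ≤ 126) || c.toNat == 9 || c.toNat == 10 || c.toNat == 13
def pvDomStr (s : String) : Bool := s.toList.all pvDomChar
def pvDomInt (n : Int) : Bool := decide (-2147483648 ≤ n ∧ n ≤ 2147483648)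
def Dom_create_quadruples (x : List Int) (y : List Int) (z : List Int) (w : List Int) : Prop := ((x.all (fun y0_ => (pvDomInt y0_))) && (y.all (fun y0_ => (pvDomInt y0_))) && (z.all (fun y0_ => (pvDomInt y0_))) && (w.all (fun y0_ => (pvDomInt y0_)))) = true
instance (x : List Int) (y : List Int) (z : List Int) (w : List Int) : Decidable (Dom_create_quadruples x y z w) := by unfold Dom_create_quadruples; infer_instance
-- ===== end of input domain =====

-- B replaces A's four nested appending loops with two precomputed pairwise
-- products combined in one pass (alternative decomposition, same cost).


-- ===== PORT A =====
-- four nested for-loops appending to the accumulator t, started at []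
def create_quadruples (x : List Int) (y : List Int) (z : List Int) (w : List Int) : List (Int × Int × Int × Int) :=
  x.foldl (fun t i =>
    y.foldl (fun t j =>
      z.foldl (fun t k =>
        w.foldl (fun t l => t ++ [(i, j, k, l)]) t) t) t) []

-- ===== PORT B =====
-- the two pairwise products, then one combining pass
def create_quadruples_alt (x : List Int) (y : List Int) (z : List Int) (w : List Int) : List (Int × Int × Int × Int) :=
  let xy := x.flatMap (fun i => y.map (fun j => (i, j)))
  let zw := z.flatMap (fun k => w.map (fun l => (k, l)))
  xy.flatMap (fun p => zw.map (fun q => (p.1, p.2, q.1, q.2)))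

-- ===== PRECONDITION & SPEC =====
def Spec_create_quadruples (x : List Int) (y : List Int) (z : List Int) (w : List Int) (out : List (Int × Int × Int × Int)) : Prop := out = create_quadruples_alt x y z w
instance (x : List Int) (y : List Int) (z : List Int) (w : List Int) (out : List (Int × Int × Int × Int)) : Decidable (Spec_create_quadruples x y z w out) := by unfold Spec_create_quadruples; infer_instance

-- ===== CLAIM (what is proved, stated in full; the proofs are below) =====
def Claim_equal_create_quadruples : Prop := ∀ (x : List Int) (y : List Int) (z : List Int) (w : List Int), Dom_create_quadruples x y z w → Spec_create_quadruples x y z w (create_quadruples x y z w)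

-- ===== LEMMAS AND PROOFS =====

-- an appending foldl is the accumulator followed by the flatMap of the step's additions
theorem foldl_append_flatMap {α β : Type} (f : α → List β) (l : List α) (init : List β) :
    l.foldl (fun t a => t ++ f a) init = init ++ l.flatMap f := by
  induction l generalizing init with
  | nil => simp
  | cons a l ih => simp [List.foldl_cons, ih, List.append_assoc]

-- the innermost loop over w
theorem loopW (w : List Int) (i j k : Int) (t : List (Int × Int × Int × Int)) :
    w.foldl (fun t l => t ++ [(i, j, k, l)]) t = t ++ w.flatMap (fun l => [(i, j, k, l)]) :=
  foldl_append_flatMap _ w t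

theorem loopZ (z w : List Int) (i j : Int) (t : List (Int × Int × Int × Int)) :
    z.foldl (fun t k => w.foldl (fun t l => t ++ [(i, j, k, l)]) t) t
      = t ++ z.flatMap (fun k => w.flatMap (fun l => [(i, j, k, l)])) := by
  have h : (fun (t : List (Int × Int × Int × Int)) k =>
      w.foldl (fun t l => t ++ [(i, j, k, l)]) t)
      = fun t k => t ++ w.flatMap (fun l => [(i, j, k, l)]) := by
    funext t k; exact loopW w i j k t
  rw [h, foldl_append_flatMap]

theorem loopY (y z w : List Int) (i : Int) (t : List (Int × Int × Int × Int)) :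
    y.foldl (fun t j => z.foldl (fun t k => w.foldl (fun t l => t ++ [(i, j, k, l)]) t) t) t
      = t ++ y.flatMap (fun j => z.flatMap (fun k => w.flatMap (fun l => [(i, j, k, l)]))) := by
  have h : (fun (t : List (Int × Int × Int × Int)) j =>
      z.foldl (fun t k => w.foldl (fun t l => t ++ [(i, j, k, l)]) t) t)
      = fun t j => t ++ z.flatMap (fun k => w.flatMap (fun l => [(i, j, k, l)])) := by
    funext t j; exact loopZ z w i j t
  rw [h, foldl_append_flatMap]

theorem a_eq_flatMap (x y z w : List Int) :
    create_quadruples x y z w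
      = x.flatMap (fun i => y.flatMap (fun j => z.flatMap (fun k => w.flatMap (fun l => [(i, j, k, l)])))) := by
  unfold create_quadruples
  have h : (fun (t : List (Int × Int × Int × Int)) i =>
      y.foldl (fun t j => z.foldl (fun t k => w.foldl (fun t l => t ++ [(i, j, k, l)]) t) t) t)
      = fun t i => t ++ y.flatMap (fun j => z.flatMap (fun k => w.flatMap (fun l => [(i, j, k, l)]))) := by
    funext t i; exact loopY y z w i t
  rw [h, foldl_append_flatMap]; simp

theorem flatMap_single {α β : Type} (f : α → β) (l : List α) :
    l.flatMap (fun a => [f a]) = l.map f := by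
  induction l with
  | nil => rfl
  | cons a l ih => simp [ih]

-- ===== VERDICT (by name: the statement is the Claim_ definition above) =====
theorem create_quadruples_spec : Claim_equal_create_quadruples := by
  intro x y z w _
  unfold Spec_create_quadruples create_quadruples_alt
  rw [a_eq_flatMap]
  simp [List.flatMap_assoc, List.map_flatMap, List.flatMap_map, Function.comp_def, flatMap_single]
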